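-- pv_equiv track=rewrite | github.com/seifreed/yaraast | yaraast/cli/simple_differ.py | diff_tokens
-- ===== SOURCE A (Python) =====
-- from collections import Counter
--
-- def diff_tokens(content1: str, content2: str) -> list[str]:
--     """Diff tokens in two contents, accounting for frequency."""
--     counts1 = Counter(content1.split())
--     counts2 = Counter(content2.split())
--
--     changes = []
--     all_tokens = sorted(set(counts1) | set(counts2))
--     for token in all_tokens:
--         c1 = counts1.get(token, 0)
--         c2 = counts2.get(token, 0)
--         if c1 > c2:
--             for _ in range(c1 - c2):
--                 changes.append(f"- {token}")
--         elif c2 > c1: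
--             for _ in range(c2 - c1):
--                 changes.append(f"+ {token}")
--
--     return changes
-- ===== SOURCE B (Python) =====
-- def _lines(c1, c2, tok):
--     if c1 > c2:
--         return ["- " + tok] * (c1 - c2)
--     if c2 > c1:
--         return ["+ " + tok] * (c2 - c1)
--     return []
--
-- def diff_tokens(content1: str, content2: str) -> list[str]:
--     """Diff tokens in two contents, accounting for frequency."""
--     t1 = sorted(content1.split())
--     t2 = sorted(content2.split())
--     n, m = len(t1), len(t2)
--     i = j = 0
--     out = []
--     while i < n or j < m:
--         if i >= n:
--             tok = t2[j]
--         elif j >= m: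
--             tok = t1[i]
--         else:
--             tok = t1[i] if t1[i] < t2[j] else t2[j]
--         c1 = 0
--         while i < n and t1[i] == tok:
--             i += 1
--             c1 += 1
--         c2 = 0
--         while j < m and t2[j] == tok:
--             j += 1
--             c2 += 1
--         out += _lines(c1, c2, tok)
--     return out
-- ===== Notes on version B (the rewrite author's own statement) =====
-- stated objective: alternative
-- what changed: Replaced Counter-based frequency diffing (two hash counters, set union, sort of distinct tokens, per-token lookups) by sorting both token lists and merging them with a two-pointer walk that measures equal-token runs on each side.
import Mathlib
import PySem

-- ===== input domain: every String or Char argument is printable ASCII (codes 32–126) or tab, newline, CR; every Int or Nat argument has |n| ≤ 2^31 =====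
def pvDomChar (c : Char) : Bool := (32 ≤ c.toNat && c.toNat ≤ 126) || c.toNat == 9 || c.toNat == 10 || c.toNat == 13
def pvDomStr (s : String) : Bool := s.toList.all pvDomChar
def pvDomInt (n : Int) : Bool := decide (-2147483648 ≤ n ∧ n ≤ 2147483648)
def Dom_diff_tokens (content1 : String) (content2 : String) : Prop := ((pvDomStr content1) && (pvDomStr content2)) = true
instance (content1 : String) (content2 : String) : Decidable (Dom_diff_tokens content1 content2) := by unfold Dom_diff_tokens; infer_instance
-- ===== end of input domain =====

-- B replaces Counter-based frequency diffing by a two-pointer merge of the two sorted token lists (objective: alternative).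


-- ===== PORT A =====
def diff_tokens (content1 : String) (content2 : String) : List String :=
  let counts1 := PySem.Dict.counter (PySem.Str.split₀ content1)
  let counts2 := PySem.Dict.counter (PySem.Str.split₀ content2)
  let all_tokens := PySem.List.sorted
      (PySem.Set.union (PySem.Set.ofList counts1.keys) (PySem.Set.ofList counts2.keys))
      (fun x => x) false
  all_tokens.foldl (fun changes token =>
    let c1 := counts1.getD token 0
    let c2 := counts2.getD token 0
    if c1 > c2 then changes ++ List.replicate (c1 - c2).toNat ("- " ++ token)
    else if c2 > c1 then changes ++ List.replicate (c2 - c1).toNat ("+ " ++ token)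
    else changes) []

-- ===== PORT B =====
-- _lines(c1, c2, tok)
def pvLines (c1 c2 : Nat) (tok : String) : List String :=
  if c1 > c2 then List.replicate (c1 - c2) ("- " ++ tok)
  else if c2 > c1 then List.replicate (c2 - c1) ("+ " ++ tok)
  else []

-- the inner 'while' loops: run length of tok at the front, and the remaining suffix
def pvRun (tok : String) : List String → Nat × List String
  | [] => (0, [])
  | x :: xs => if x = tok then let p := pvRun tok xs; (p.1 + 1, p.2) else (0, x :: xs)

-- the choice of the next token (smaller head)
def pvTok : List String → List String → String
  | [], [] => ""
  | x :: _, [] => x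
  | [], y :: _ => y
  | x :: _, y :: _ => if x < y then x else y

theorem pvRun_len_le (tok : String) (l : List String) : (pvRun tok l).2.length ≤ l.length := by
  induction l with
  | nil => simp [pvRun]
  | cons x xs ih =>
    simp only [pvRun]
    split
    · simpa using Nat.le_succ_of_le ih
    · simp

theorem pvRun_len_lt (tok : String) (xs : List String) :
    (pvRun tok (tok :: xs)).2.length < (tok :: xs).length := by
  have h := pvRun_len_le tok xs
  simp only [pvRun]
  simpa using Nat.lt_succ_of_le h

theorem pvGo_dec (t1 t2 : List String) (h : ¬(t1 = [] ∧ t2 = [])) :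
    (pvRun (pvTok t1 t2) t1).2.length + (pvRun (pvTok t1 t2) t2).2.length < t1.length + t2.length := by
  rcases t1 with _ | ⟨x, xs⟩ <;> rcases t2 with _ | ⟨y, ys⟩
  · exact absurd ⟨rfl, rfl⟩ h
  · have ht : pvTok [] (y :: ys) = y := rfl
    have h1 : pvRun y [] = (0, []) := rfl
    rw [ht, h1]
    simpa using pvRun_len_lt y ys
  · have ht : pvTok (x :: xs) [] = x := rfl
    have h1 : pvRun x [] = (0, []) := rfl
    rw [ht, h1]
    simpa using pvRun_len_lt x xs
  · by_cases hxy : x < y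
    · have ht : pvTok (x :: xs) (y :: ys) = x := by simp [pvTok, hxy]
      rw [ht]
      have h1 := pvRun_len_lt x xs
      have h2 := pvRun_len_le x (y :: ys)
      omega
    · have ht : pvTok (x :: xs) (y :: ys) = y := by simp [pvTok, hxy]
      rw [ht]
      have h1 := pvRun_len_le y (x :: xs)
      have h2 := pvRun_len_lt y ys
      omega

-- the outer 'while' loop of B, walking both sorted lists
def pvGo (t1 t2 out : List String) : List String :=
  if h : t1 = [] ∧ t2 = [] then out
  else
    let tok := pvTok t1 t2
    let p1 := pvRun tok t1
    let p2 := pvRun tok t2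
    pvGo p1.2 p2.2 (out ++ pvLines p1.1 p2.1 tok)
termination_by t1.length + t2.length
decreasing_by exact pvGo_dec t1 t2 h

def diff_tokens_alt (content1 : String) (content2 : String) : List String :=
  pvGo (PySem.List.sorted (PySem.Str.split₀ content1) (fun x => x) false)
       (PySem.List.sorted (PySem.Str.split₀ content2) (fun x => x) false)
       []

-- ===== PRECONDITION & SPEC =====
def Spec_diff_tokens (content1 : String) (content2 : String) (out : List String) : Prop := out = diff_tokens_alt content1 content2
instance (content1 : String) (content2 : String) (out : List String) : Decidable (Spec_diff_tokens content1 content2 out) := by unfold Spec_diff_tokens; infer_instance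

-- ===== CLAIM (what is proved, stated in full; the proofs are below) =====
def Claim_equal_diff_tokens : Prop := ∀ (content1 : String) (content2 : String), Dom_diff_tokens content1 content2 → Spec_diff_tokens content1 content2 (diff_tokens content1 content2)

-- ===== LEMMAS AND PROOFS =====

theorem pvRun_spec (tok : String) (l : List String)
    (hs : l.Pairwise (· ≤ ·)) (hmin : ∀ x ∈ l, tok ≤ x) :
    (pvRun tok l).1 = l.count tok ∧ (pvRun tok l).2 = l.filter (fun x => x ≠ tok) := by
  induction l with
  | nil => simp [pvRun]
  | cons x xs ih =>
    rcases List.pairwise_cons.mp hs with ⟨hx, hxs⟩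
    by_cases hxt : x = tok
    · subst hxt
      have h := ih hxs (fun y hy => hmin y (List.mem_cons_of_mem _ hy))
      simp [pvRun, h.1, h.2]
    · have hlt : tok < x :=
        lt_of_le_of_ne (hmin x (List.mem_cons_self ..)) (Ne.symm hxt)
      have hno : ∀ y ∈ x :: xs, y ≠ tok := by
        intro y hy
        rcases List.mem_cons.mp hy with rfl | hy'
        · exact hxt
        · intro rfl; exact absurd (hx y hy') (not_le.mpr hlt)
      constructor
      · simp only [pvRun, if_neg hxt]
        have : tok ∉ x :: xs := fun hmem => hno tok hmem rfl
        simp [List.count_eq_zero.mpr this]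
      · simp only [pvRun, if_neg hxt]
        rw [List.filter_eq_self.mpr]
        intro y hy
        simpa using hno y hy

theorem pvTok_mem (t1 t2 : List String) (hne : ¬(t1 = [] ∧ t2 = [])) :
    pvTok t1 t2 ∈ t1 ∨ pvTok t1 t2 ∈ t2 := by
  rcases t1 with _ | ⟨x, xs⟩ <;> rcases t2 with _ | ⟨y, ys⟩
  · exact absurd ⟨rfl, rfl⟩ hne
  · right; simp [pvTok]
  · left; simp [pvTok]
  · simp only [pvTok]
    split_ifs <;> simp

theorem pvTok_min (t1 t2 : List String)
    (h1 : t1.Pairwise (· ≤ ·)) (h2 : t2.Pairwise (· ≤ ·)) :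
    ∀ x, x ∈ t1 ∨ x ∈ t2 → pvTok t1 t2 ≤ x := by
  have head_le : ∀ (z : String) (zs : List String), (z :: zs).Pairwise (· ≤ ·) →
      ∀ x ∈ z :: zs, z ≤ x := by
    intro z zs hp x hx
    rcases List.mem_cons.mp hx with rfl | hx'
    · exact le_refl x
    · exact (List.pairwise_cons.mp hp).1 x hx'
  rcases t1 with _ | ⟨a, as⟩ <;> rcases t2 with _ | ⟨b, bs⟩ <;> intro x hx
  · simp at hx
  · rcases hx with hx | hx
    · simp at hx
    · exact head_le b bs h2 x hx
  · rcases hx with hx | hx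
    · exact head_le a as h1 x hx
    · simp at hx
  · have hta : pvTok (a :: as) (b :: bs) ≤ a := by
      simp only [pvTok]; split_ifs <;> [exact le_refl a; exact le_of_not_gt (by assumption)]
    have htb : pvTok (a :: as) (b :: bs) ≤ b := by
      simp only [pvTok]; split_ifs <;> [exact le_of_lt (by assumption); exact le_refl b]
    rcases hx with hx | hx
    · exact le_trans hta (head_le a as h1 x hx)
    · exact le_trans htb (head_le b bs h2 x hx)

theorem flatMap_congr_mem {α β : Type} (l : List α) (f g : α → List β)
    (h : ∀ x ∈ l, f x = g x) : l.flatMap f = l.flatMap g := by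
  induction l with
  | nil => rfl
  | cons a t ih =>
    simp only [List.flatMap_cons]
    rw [h a (by simp), ih (fun x hx => h x (by simp [hx]))]

theorem pvGo_eq (n : Nat) : ∀ (t1 t2 U out : List String),
    t1.length + t2.length ≤ n →
    t1.Pairwise (· ≤ ·) → t2.Pairwise (· ≤ ·) →
    U.Pairwise (· < ·) → (∀ x, x ∈ U ↔ x ∈ t1 ∨ x ∈ t2) →
    pvGo t1 t2 out = out ++ U.flatMap (fun tok => pvLines (t1.count tok) (t2.count tok) tok) := by
  induction n with
  | zero =>
    intro t1 t2 U out hlen h1 h2 hU hmem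
    have ht1 : t1 = [] := List.length_eq_zero_iff.mp (by omega)
    have ht2 : t2 = [] := List.length_eq_zero_iff.mp (by omega)
    subst ht1; subst ht2
    have hUnil : U = [] := by
      apply List.eq_nil_iff_forall_not_mem.mpr
      intro x hx
      rcases (hmem x).mp hx with hx' | hx' <;> simp at hx'
    subst hUnil
    rw [pvGo]; simp
  | succ m ih =>
    intro t1 t2 U out hlen h1 h2 hU hmem
    by_cases hemp : t1 = [] ∧ t2 = []
    · obtain ⟨ha, hb⟩ := hemp; subst ha; subst hb
      have hUnil : U = [] := by
        apply List.eq_nil_iff_forall_not_mem.mpr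
        intro x hx
        rcases (hmem x).mp hx with hx' | hx' <;> simp at hx'
      subst hUnil
      rw [pvGo]; simp
    · set tok := pvTok t1 t2 with htok
      have hmin : ∀ x, x ∈ t1 ∨ x ∈ t2 → tok ≤ x := pvTok_min t1 t2 h1 h2
      have hr1 := pvRun_spec tok t1 h1 (fun x hx => hmin x (Or.inl hx))
      have hr2 := pvRun_spec tok t2 h2 (fun x hx => hmin x (Or.inr hx))
      -- U = tok :: U'
      have htokU : tok ∈ U := (hmem tok).mpr (pvTok_mem t1 t2 hemp)
      obtain ⟨u, U', rfl⟩ : ∃ u U', U = u :: U' := by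
        cases U with
        | nil => simp at htokU
        | cons u U' => exact ⟨u, U', rfl⟩
      have hu : u = tok := by
        rcases List.mem_cons.mp htokU with h | h
        · exact h.symm
        · have hlt : u < tok := (List.pairwise_cons.mp hU).1 tok h
          have hle : tok ≤ u := hmin u ((hmem u).mp (by simp))
          exact absurd hlt (not_lt.mpr hle)
      subst hu
      have hU' : U'.Pairwise (· < ·) := (List.pairwise_cons.mp hU).2
      have hUgt : ∀ x ∈ U', tok < x := (List.pairwise_cons.mp hU).1
      -- membership in the rests
      have hmemR : ∀ x, x ∈ U' ↔ x ∈ (pvRun tok t1).2 ∨ x ∈ (pvRun tok t2).2 := by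
        intro x
        rw [hr1.2, hr2.2]
        simp only [List.mem_filter, decide_eq_true_eq]
        constructor
        · intro hx
          have hne : x ≠ tok := fun heq => absurd (heq ▸ hUgt x hx) (lt_irrefl tok)
          rcases (hmem x).mp (by simp [hx]) with h | h
          · exact Or.inl ⟨h, hne⟩
          · exact Or.inr ⟨h, hne⟩
        · intro hx
          have hxU : x ∈ tok :: U' := by
            apply (hmem x).mpr
            rcases hx with ⟨h, _⟩ | ⟨h, _⟩
            · exact Or.inl h
            · exact Or.inr h
          rcases List.mem_cons.mp hxU with rfl | h
          · rcases hx with ⟨_, hne⟩ | ⟨_, hne⟩ <;> exact absurd rfl hne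
          · exact h
      have hp1 : (pvRun tok t1).2.Pairwise (· ≤ ·) := by
        rw [hr1.2]; exact h1.sublist List.filter_sublist
      have hp2 : (pvRun tok t2).2.Pairwise (· ≤ ·) := by
        rw [hr2.2]; exact h2.sublist List.filter_sublist
      have hdec := pvGo_dec t1 t2 hemp
      have hlen' : (pvRun tok t1).2.length + (pvRun tok t2).2.length ≤ m := by
        rw [← htok] at hdec; omega
      have hcnt : ∀ x ∈ U', (pvRun tok t1).2.count x = t1.count x ∧ (pvRun tok t2).2.count x = t2.count x := by
        intro x hx
        have hne : x ≠ tok := fun heq => absurd (heq ▸ hUgt x hx) (lt_irrefl tok)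
        rw [hr1.2, hr2.2]
        constructor <;>
          · rw [List.count_filter]
            simp [hne]
      rw [pvGo, dif_neg hemp]
      simp only
      rw [← htok]
      rw [ih (pvRun tok t1).2 (pvRun tok t2).2 U' (out ++ pvLines (pvRun tok t1).1 (pvRun tok t2).1 tok)
        hlen' hp1 hp2 hU' hmemR]
      rw [flatMap_congr_mem U' _ (fun tok => pvLines (t1.count tok) (t2.count tok) tok)
        (fun x hx => by rw [(hcnt x hx).1, (hcnt x hx).2])]
      rw [hr1.1, hr2.1]
      simp [List.flatMap_cons, List.append_assoc]

theorem body_eq (w1 w2 : List String) (changes : List String) (token : String) :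
    (let c1 := (PySem.Dict.counter w1).getD token 0
     let c2 := (PySem.Dict.counter w2).getD token 0
     if c1 > c2 then changes ++ List.replicate (c1 - c2).toNat ("- " ++ token)
     else if c2 > c1 then changes ++ List.replicate (c2 - c1).toNat ("+ " ++ token)
     else changes)
    = changes ++ pvLines (w1.count token) (w2.count token) token := by
  simp only [PySem.Dict.getD_counter, pvLines, gt_iff_lt, Nat.cast_lt]
  have h1 : ((w1.count token : Int) - (w2.count token : Int)).toNat
      = w1.count token - w2.count token := by omega
  have h2 : ((w2.count token : Int) - (w1.count token : Int)).toNat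
      = w2.count token - w1.count token := by omega
  rw [h1, h2]
  split_ifs <;> simp

theorem A_foldl (w1 w2 : List String) (l acc : List String) :
    l.foldl (fun changes token =>
      let c1 := (PySem.Dict.counter w1).getD token 0
      let c2 := (PySem.Dict.counter w2).getD token 0
      if c1 > c2 then changes ++ List.replicate (c1 - c2).toNat ("- " ++ token)
      else if c2 > c1 then changes ++ List.replicate (c2 - c1).toNat ("+ " ++ token)
      else changes) acc
    = acc ++ l.flatMap (fun tok => pvLines (w1.count tok) (w2.count tok) tok) := by
  induction l generalizing acc with
  | nil => simp
  | cons t ts ih =>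
    rw [List.foldl_cons, ih, body_eq]
    simp [List.flatMap_cons, List.append_assoc]

-- ===== VERDICT (by name: the statement is the Claim_ definition above) =====
theorem diff_tokens_spec : Claim_equal_diff_tokens := by
  intro content1 content2 _
  unfold Spec_diff_tokens
  set w1 := PySem.Str.split₀ content1 with hw1
  set w2 := PySem.Str.split₀ content2 with hw2
  set allT := PySem.List.sorted
      (PySem.Set.union (PySem.Set.ofList (PySem.Dict.counter w1).keys)
        (PySem.Set.ofList (PySem.Dict.counter w2).keys)) (fun x => x) false with hallT
  have hmemA : ∀ x, x ∈ allT ↔ x ∈ w1 ∨ x ∈ w2 := by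
    intro x
    rw [hallT, PySem.List.mem_sorted, PySem.Set.mem_union,
      PySem.Set.mem_ofList, PySem.Set.mem_ofList,
      PySem.Dict.keys_counter, PySem.Dict.keys_counter,
      PySem.Set.mem_ofList, PySem.Set.mem_ofList]
  have hnodupA : allT.Nodup := by
    rw [hallT]
    exact (PySem.List.sorted_perm _ _ _).nodup_iff.mpr
      (PySem.Set.nodup_union _ _ (PySem.Set.nodup_ofList _))
  have hpwA : allT.Pairwise (· < ·) := by
    have hle : allT.Pairwise (· ≤ ·) := by
      simpa using PySem.List.sorted_pairwise (xs := _) (key := fun x : String => x)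
    exact (hle.and hnodupA).imp (fun h => lt_of_le_of_ne h.1 h.2)
  set s1 := PySem.List.sorted w1 (fun x => x) false with hs1
  set s2 := PySem.List.sorted w2 (fun x => x) false with hs2
  have hB : diff_tokens_alt content1 content2
      = allT.flatMap (fun tok => pvLines (s1.count tok) (s2.count tok) tok) := by
    rw [diff_tokens_alt]
    exact pvGo_eq (s1.length + s2.length) s1 s2 allT [] le_rfl
      (by simpa using PySem.List.sorted_pairwise (xs := w1) (key := fun x : String => x))
      (by simpa using PySem.List.sorted_pairwise (xs := w2) (key := fun x : String => x))
      hpwA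
      (fun x => by rw [hmemA x, hs1, hs2, PySem.List.mem_sorted, PySem.List.mem_sorted])
  have hcntB : ∀ tok, s1.count tok = w1.count tok ∧ s2.count tok = w2.count tok := by
    intro tok
    exact ⟨(PySem.List.sorted_perm _ _ _).count_eq tok, (PySem.List.sorted_perm _ _ _).count_eq tok⟩
  rw [hB, flatMap_congr_mem allT _ (fun tok => pvLines (w1.count tok) (w2.count tok) tok)
    (fun x _ => by rw [(hcntB x).1, (hcntB x).2])]
  rw [diff_tokens]
  simp only
  rw [A_foldl w1 w2 allT []]
  simp
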